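-- pv_equiv track=rewrite | github.com/lebedec/add | server/service/state.py | find_max_rectangles
-- ===== SOURCE A (Python) =====
-- from typing import Optional
--
-- RectCoords = tuple[int, int, int, int]
--
-- def find_max_rectangles(matrix: list[list[int]], mark: int, min_area=1) -> Optional[RectCoords]:
--     position = [0, 0]
--     size = [0, 0]
--
--     if not matrix:
--         return None
--
--     rows = len(matrix)
--     cols = len(matrix[0])
--     left = [0] * cols  # Array to store the left boundary of consecutive 1's
--     right = [cols] * cols  # Array to store the right boundary of consecutive 1's
--     height = [0] * cols  # Array to store the height of consecutive 1's
--
--     max_area = 0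
--
--     for i in range(0, rows):
--         row = matrix[i]
--         cur_left = 0
--         cur_right = cols
--
--         # Update height array
--         for j in range(0, cols):
--             if row[j] == mark:
--                 height[j] += 1
--             else:
--                 height[j] = 0
--
--         # Update left boundary array
--         for j in range(0, cols):
--             if row[j] == mark:
--                 left[j] = max(left[j], cur_left)
--             else:
--                 left[j] = 0
--                 cur_left = j + 1
--
--         # Update right boundary array
--         for j in range(cols - 1, -1, -1):
--             if row[j] == mark:
--                 right[j] = min(right[j], cur_right)
--             else:
--                 right[j] = cols
--                 cur_right = j
--
--         # Calculate maximum area for each cell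
--         for j in range(0, cols):
--             area = (right[j] - left[j]) * height[j]
--             if area > max_area:
--                 max_area = area
--
--                 size[0] = right[j] - left[j]
--                 size[1] = height[j]
--                 position[0] = left[j]
--                 position[1] = i - height[j] + 1
--
--     if max_area > min_area:
--         return position[0], position[1], size[0], size[1]
--
--     return None
-- ===== SOURCE B (Python) =====
-- def find_max_rectangles(matrix, mark, min_area=1):
--     if not matrix:
--         return None
--     cols = len(matrix[0])
--     best = (0, 0, 0, 0, 0)  # (area, x, y, w, h)
--     for i, row in enumerate(matrix):
--         for j in range(cols):
--             if row[j] != mark: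
--                 continue
--             # height of the run of marks in column j ending at row i
--             h = 1
--             while i - h >= 0 and matrix[i - h][j] == mark:
--                 h += 1
--             # intersect the horizontal runs through column j of those h rows
--             l, r = 0, cols
--             for t in range(i - h + 1, i + 1):
--                 trow = matrix[t]
--                 tl = j
--                 while tl > 0 and trow[tl - 1] == mark:
--                     tl -= 1
--                 tr = j + 1
--                 while tr < cols and trow[tr] == mark:
--                     tr += 1
--                 l = max(l, tl)
--                 r = min(r, tr)
--             area = (r - l) * h
--             if area > best[0]:
--                 best = (area, l, i - h + 1, r - l, h)
--     if best[0] > min_area: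
--         return best[1], best[2], best[3], best[4]
--     return None
-- ===== Notes on version B (the rewrite author's own statement) =====
-- stated objective: alternative
-- what changed: Replaces A's dynamic-programming boundary arrays (height/left/right carried and updated across rows) by a direct per-cell computation: for each mark cell, scan the column upward for the run height and intersect the horizontal runs of those rows, keeping A's row-major scan order and strict-improvement tie-break.
import Mathlib
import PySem

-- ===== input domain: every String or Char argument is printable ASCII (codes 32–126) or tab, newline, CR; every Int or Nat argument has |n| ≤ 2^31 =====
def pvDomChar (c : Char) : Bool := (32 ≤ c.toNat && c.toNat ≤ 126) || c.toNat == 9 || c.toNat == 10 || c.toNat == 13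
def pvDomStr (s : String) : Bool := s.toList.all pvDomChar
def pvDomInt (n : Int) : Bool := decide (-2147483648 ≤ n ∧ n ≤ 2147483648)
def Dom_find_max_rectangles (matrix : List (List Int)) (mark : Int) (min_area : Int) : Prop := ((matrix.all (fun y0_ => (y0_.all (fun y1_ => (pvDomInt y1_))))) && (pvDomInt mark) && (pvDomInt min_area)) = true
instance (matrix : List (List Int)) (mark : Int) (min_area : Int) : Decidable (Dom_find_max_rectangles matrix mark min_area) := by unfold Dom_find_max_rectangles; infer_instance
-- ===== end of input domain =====

-- B replaces A's dynamic-programming boundary arrays (height/left/right updated across rows)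
-- by a direct per-cell computation (column run height + intersection of horizontal runs),
-- keeping A's scan order and strict-improvement tie-break; objective: alternative (not faster).

-- ===== PORT A =====
-- inner loop "for j: height[j] += 1 / = 0" (walks row and height together)
def aHeight (mark : Int) : List Int → List Int → List Int
  | r :: rs, h :: hs => (if r = mark then h + 1 else 0) :: aHeight mark rs hs
  | _, _ => []

-- inner loop "for j: left[j] = max(left[j], cur_left) / = 0; cur_left = j+1"
def aLeft (mark : Int) : Int → Nat → List Int → List Int → List Int
  | cl, j, r :: rs, l :: ls =>
      if r = mark then (max l cl) :: aLeft mark cl (j + 1) rs ls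
      else 0 :: aLeft mark ((j : Int) + 1) (j + 1) rs ls
  | _, _, _, _ => []

-- inner loop "for j in range(cols-1,-1,-1): right[j] = min(right[j], cur_right) / = cols; cur_right = j"
-- (the reversed loop becomes recursion that processes the tail — the higher indices — first;
--  the second component is the value of cur_right after processing this suffix)
def aRight (mark cols : Int) : Nat → List Int → List Int → (List Int × Int)
  | j, r :: rs, t :: ts =>
      let p := aRight mark cols (j + 1) rs ts
      if r = mark then ((min t p.2) :: p.1, p.2)
      else (cols :: p.1, (j : Int))
  | _, _, _ => ([], cols)

-- inner loop "for j: area = (right[j]-left[j])*height[j]; if area > max_area: update"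
-- state = (max_area, position[0], position[1], size[0], size[1])
def aArea (i : Int) : (Int × Int × Int × Int × Int) → List Int → List Int → List Int → (Int × Int × Int × Int × Int)
  | st, l :: ls, t :: ts, h :: hs =>
      aArea i (if (t - l) * h > st.1 then ((t - l) * h, l, i - h + 1, t - l, h) else st) ls ts hs
  | st, _, _, _ => st

-- outer loop "for i in range(rows)"
def aRows (mark cols : Int) : Int → List Int → List Int → List Int → (Int × Int × Int × Int × Int) → List (List Int) → (Int × Int × Int × Int × Int)
  | _, _, _, _, st, [] => st
  | i, hgt, lft, rgt, st, row :: rest =>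
      let hgt' := aHeight mark row hgt
      let lft' := aLeft mark 0 0 row lft
      let rgt' := (aRight mark cols 0 row rgt).1
      aRows mark cols (i + 1) hgt' lft' rgt' (aArea i st lft' rgt' hgt') rest

def find_max_rectangles (matrix : List (List Int)) (mark : Int) (min_area : Int) : Option (Int × Int × Int × Int) :=
  match matrix with
  | [] => none
  | row0 :: _ =>
      let cols := row0.length
      let st := aRows mark (cols : Int) 0 (List.replicate cols 0) (List.replicate cols 0) (List.replicate cols (cols : Int)) (0, 0, 0, 0, 0) matrix
      if st.1 > min_area then some (st.2.1, st.2.2.1, st.2.2.2.1, st.2.2.2.2) else none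

-- ===== PORT B =====
-- matrix[i][j] (all accesses are in range on Pre_)
def cellAt (matrix : List (List Int)) (i j : Nat) : Int := (matrix.getD i []).getD j 0

-- "tl = j; while tl > 0 and trow[tl-1] == mark: tl -= 1"
def bL (mark : Int) (row : List Int) : Nat → Nat
  | 0 => 0
  | tl + 1 => if row.getD tl 0 = mark then bL mark row tl else tl + 1

-- "tr = j+1; while tr < cols and trow[tr] == mark: tr += 1"
def bR (mark : Int) (row : List Int) (cols tr : Nat) : Nat :=
  if c : tr < cols ∧ row.getD tr 0 = mark then bR mark row cols (tr + 1) else tr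
termination_by cols - tr
decreasing_by obtain ⟨h1, -⟩ := c; omega

-- "h = 1; while i - h >= 0 and matrix[i-h][j] == mark: h += 1"
def bUpGo (mark : Int) (matrix : List (List Int)) (j i h : Nat) : Nat :=
  if c : h ≤ i ∧ cellAt matrix (i - h) j = mark then bUpGo mark matrix j i (h + 1) else h
termination_by i + 1 - h
decreasing_by obtain ⟨h1, -⟩ := c; omega

-- "l, r = 0, cols; for t in range(i-h+1, i+1): l = max(l, tl); r = min(r, tr)"
-- (the ascending loop over the h rows ending at row i, as recursion on h)
def bLR (mark : Int) (matrix : List (List Int)) (cols j : Nat) : Nat → Nat → (Nat × Nat)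
  | _, 0 => (0, cols)
  | i, h + 1 =>
      let p := bLR mark matrix cols j (i - 1) h
      let row := matrix.getD i []
      (max p.1 (bL mark row j), min p.2 (bR mark row cols (j + 1)))

-- "for j in range(cols): if row[j] != mark: continue; …"  (fuel = cols - j)
def bRowGo (mark : Int) (matrix : List (List Int)) (cols i : Nat) (row : List Int) : Nat → Nat → (Int × Int × Int × Int × Int) → (Int × Int × Int × Int × Int)
  | _, 0, st => st
  | j, f + 1, st =>
      let st' :=
        if row.getD j 0 = mark then
          let hh := bUpGo mark matrix j i 1
          let p := bLR mark matrix cols j i hh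
          if ((p.2 : Int) - (p.1 : Int)) * (hh : Int) > st.1 then
            (((p.2 : Int) - (p.1 : Int)) * (hh : Int), (p.1 : Int), (i : Int) - (hh : Int) + 1, (p.2 : Int) - (p.1 : Int), (hh : Int))
          else st
        else st
      bRowGo mark matrix cols i row (j + 1) f st'

-- "for i, row in enumerate(matrix)"
def bRows (mark : Int) (matrix : List (List Int)) (cols : Nat) : Nat → (Int × Int × Int × Int × Int) → List (List Int) → (Int × Int × Int × Int × Int)
  | _, st, [] => st
  | i, st, row :: rest => bRows mark matrix cols (i + 1) (bRowGo mark matrix cols i row 0 cols st) rest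

def find_max_rectangles_alt (matrix : List (List Int)) (mark : Int) (min_area : Int) : Option (Int × Int × Int × Int) :=
  match matrix with
  | [] => none
  | row0 :: _ =>
      let cols := row0.length
      let st := bRows mark matrix cols 0 (0, 0, 0, 0, 0) matrix
      if st.1 > min_area then some (st.2.1, st.2.2.1, st.2.2.2.1, st.2.2.2.2) else none

-- ===== PRECONDITION & SPEC =====
-- Pre_ excludes exactly the ragged matrices containing a row shorter than the first row,
-- on which the Python A raises IndexError (row[j] for j < len(matrix[0])).
def Pre_find_max_rectangles (matrix : List (List Int)) (mark : Int) (min_area : Int) : Prop :=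
  ∀ row ∈ matrix, (matrix.headD []).length ≤ row.length
instance (matrix : List (List Int)) (mark : Int) (min_area : Int) : Decidable (Pre_find_max_rectangles matrix mark min_area) := by unfold Pre_find_max_rectangles; infer_instance

def pvWitness_find_max_rectangles : List (List Int) × Int × Int := ([[1, 1, 0], [1, 1, 1]], 1, 1)

def Spec_find_max_rectangles (matrix : List (List Int)) (mark : Int) (min_area : Int) (out : Option (Int × Int × Int × Int)) : Prop := out = find_max_rectangles_alt matrix mark min_area
instance (matrix : List (List Int)) (mark : Int) (min_area : Int) (out : Option (Int × Int × Int × Int)) : Decidable (Spec_find_max_rectangles matrix mark min_area out) := by unfold Spec_find_max_rectangles; infer_instance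

-- ===== CLAIM (what is proved, stated in full; the proofs are below) =====
def Claim_equal_find_max_rectangles : Prop := ∀ (matrix : List (List Int)) (mark : Int) (min_area : Int), Dom_find_max_rectangles matrix mark min_area → Pre_find_max_rectangles matrix mark min_area → Spec_find_max_rectangles matrix mark min_area (find_max_rectangles matrix mark min_area)

-- ===== LEMMAS AND PROOFS =====

-- closed forms for A's arrays after i rows
def countUp (mark : Int) (matrix : List (List Int)) (j : Nat) : Nat → Nat
  | 0 => 0
  | i + 1 => if cellAt matrix i j = mark then countUp mark matrix j i + 1 else 0

def Lf (mark : Int) (matrix : List (List Int)) (j : Nat) : Nat → Nat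
  | 0 => 0
  | i + 1 => if cellAt matrix i j = mark then max (Lf mark matrix j i) (bL mark (matrix.getD i []) j) else 0

def Rf (mark : Int) (matrix : List (List Int)) (cols j : Nat) : Nat → Nat
  | 0 => cols
  | i + 1 => if cellAt matrix i j = mark then min (Rf mark matrix cols j i) (bR mark (matrix.getD i []) cols (j + 1)) else cols

theorem bUpGo_spec (mark : Int) (matrix : List (List Int)) (j : Nat) :
    ∀ (k i h : Nat), h ≤ i + 1 → i + 1 - h = k → bUpGo mark matrix j i h = h + countUp mark matrix j k := by
  intro k
  induction k with
  | zero =>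
    intro i h h1 h2
    rw [bUpGo, dif_neg (by rintro ⟨hc, -⟩; omega)]
    simp [countUp]
  | succ k ih =>
    intro i h h1 h2
    rw [bUpGo]
    have hhi : h ≤ i := by omega
    have hik : i - h = k := by omega
    by_cases hm : cellAt matrix (i - h) j = mark
    · rw [dif_pos ⟨hhi, hm⟩, ih i (h + 1) (by omega) (by omega)]
      rw [hik] at hm
      simp [countUp, hm]
      omega
    · rw [dif_neg (by rintro ⟨-, hc⟩; exact hm hc)]
      rw [hik] at hm
      simp [countUp, hm]

theorem bLR_spec (mark : Int) (matrix : List (List Int)) (cols j : Nat) :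
    ∀ i, bLR mark matrix cols j i (countUp mark matrix j (i + 1)) = (Lf mark matrix j (i + 1), Rf mark matrix cols j (i + 1)) := by
  intro i
  induction i with
  | zero =>
    by_cases hm : cellAt matrix 0 j = mark
    · simp [countUp, Lf, Rf, hm, bLR]
    · simp [countUp, Lf, Rf, hm, bLR]
  | succ k ih =>
    by_cases hm : cellAt matrix (k + 1) j = mark
    · rw [show countUp mark matrix j (k + 2) = countUp mark matrix j (k + 1) + 1 by simp [countUp, hm]]
      simp only [bLR, Nat.add_sub_cancel]
      rw [ih]
      simp [Lf, Rf, hm]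
    · simp [countUp, hm, bLR, Lf, Rf]

theorem aHeight_length (mark : Int) : ∀ (rs hs : List Int), (aHeight mark rs hs).length = min rs.length hs.length := by
  intro rs
  induction rs with
  | nil => intro hs; simp [aHeight]
  | cons r rs ih =>
    intro hs
    cases hs with
    | nil => simp [aHeight]
    | cons h hs => simp [aHeight, ih]

theorem aHeight_getD (mark : Int) : ∀ (rs hs : List Int) (k : Nat), k < rs.length → k < hs.length →
    (aHeight mark rs hs).getD k 0 = if rs.getD k 0 = mark then hs.getD k 0 + 1 else 0 := by
  intro rs
  induction rs with
  | nil => intro hs k h1 h2; simp at h1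
  | cons r rs ih =>
    intro hs k h1 h2
    cases hs with
    | nil => simp at h2
    | cons h hs =>
      cases k with
      | zero => simp [aHeight]
      | succ k => simpa [aHeight] using ih hs k (by simpa using h1) (by simpa using h2)

theorem aLeft_length (mark : Int) : ∀ (rs ls : List Int) (cl : Int) (j : Nat), (aLeft mark cl j rs ls).length = min rs.length ls.length := by
  intro rs
  induction rs with
  | nil => intro ls cl j; simp [aLeft]
  | cons r rs ih =>
    intro ls cl j
    cases ls with
    | nil => simp [aLeft]
    | cons l ls =>
      by_cases h : r = mark <;> simp [aLeft, h, ih]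

theorem aLeft_getD (mark : Int) (r : List Int) : ∀ (ls : List Int) (j k : Nat), j + k < r.length → k < ls.length →
    (aLeft mark ((bL mark r j : Nat) : Int) j (r.drop j) ls).getD k 0 =
      if r.getD (j + k) 0 = mark then max (ls.getD k 0) ((bL mark r (j + k) : Nat) : Int) else 0 := by
  intro ls
  induction ls with
  | nil => intro j k h1 h2; simp at h2
  | cons l ls ih =>
    intro j k h1 h2
    have hj : j < r.length := by omega
    have hd : r.drop j = r[j] :: r.drop (j + 1) := List.drop_eq_getElem_cons hj
    have hg : r.getD j 0 = r[j] := List.getD_eq_getElem r 0 hj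
    have hg2 : r[j]? = some r[j] := List.getElem?_eq_getElem hj
    rw [hd]
    by_cases hm : r[j] = mark
    · have hcl : bL mark r (j + 1) = bL mark r j := by simp [bL, hg2, hm]
      cases k with
      | zero => simp [aLeft, hm, hg2, List.getD]
      | succ k =>
        simp only [aLeft, hm, if_true, List.getD_cons_succ]
        rw [← hcl, ih (j + 1) k (by omega) (by simpa using h2),
          show j + (k + 1) = j + 1 + k by omega]
    · have hcl : bL mark r (j + 1) = j + 1 := by simp [bL, hg2, hm]
      cases k with
      | zero => simp [aLeft, hm, hg2, List.getD]
      | succ k =>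
        have hc2 : ((j : Int) + 1) = ((bL mark r (j + 1) : Nat) : Int) := by rw [hcl]; push_cast; ring
        simp only [aLeft, hm, if_false, List.getD_cons_succ]
        rw [hc2, ih (j + 1) k (by omega) (by simpa using h2),
          show j + (k + 1) = j + 1 + k by omega]

theorem aRight_length (mark cols : Int) : ∀ (rs ts : List Int) (j : Nat), (aRight mark cols j rs ts).1.length = min rs.length ts.length := by
  intro rs
  induction rs with
  | nil => intro ts j; simp [aRight]
  | cons r rs ih =>
    intro ts j
    cases ts with
    | nil => simp [aRight]
    | cons t ts =>
      by_cases h : r = mark <;> simp [aRight, h, ih]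

theorem bR_ge (mark : Int) (r : List Int) (cols tr : Nat) (h : cols ≤ tr) : bR mark r cols tr = tr := by
  rw [bR, dif_neg]
  rintro ⟨hc, -⟩
  omega

theorem aRight_spec (mark : Int) (r : List Int) (colsN : Nat) (hc : colsN ≤ r.length) :
    ∀ (ts : List Int) (j : Nat), ts.length = colsN - j → j ≤ colsN →
      (aRight mark (colsN : Int) j (r.drop j) ts).2 = ((bR mark r colsN j : Nat) : Int) ∧
      (∀ k, k < ts.length →
        (aRight mark (colsN : Int) j (r.drop j) ts).1.getD k 0 =
          if r.getD (j + k) 0 = mark then min (ts.getD k 0) ((bR mark r colsN (j + k + 1) : Nat) : Int) else (colsN : Int)) := by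
  intro ts
  induction ts with
  | nil =>
    intro j h1 h2
    have hj : j = colsN := by simp at h1; omega
    refine ⟨?_, by simp⟩
    rw [hj]
    cases r.drop colsN <;> simp [aRight, bR_ge mark r colsN colsN le_rfl]
  | cons t ts ih =>
    intro j h1 h2
    have hj : j < colsN := by simp at h1; omega
    have hjr : j < r.length := lt_of_lt_of_le hj hc
    have hd : r.drop j = r[j] :: r.drop (j + 1) := List.drop_eq_getElem_cons hjr
    have hg : r.getD j 0 = r[j] := List.getD_eq_getElem r 0 hjr
    have hg2 : r[j]? = some r[j] := List.getElem?_eq_getElem hjr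
    obtain ⟨ih2, ih1⟩ := ih (j + 1) (by simp at h1 ⊢; omega) (by omega)
    rw [hd]
    by_cases hm : r[j] = mark
    · have hbr : bR mark r colsN j = bR mark r colsN (j + 1) := by
        rw [bR, dif_pos ⟨hj, hg ▸ hm⟩]
      constructor
      · simp only [aRight, hm, if_true]
        rw [ih2, hbr]
      · intro k hk
        cases k with
        | zero =>
          simp only [aRight, hm, if_true, List.getD_cons_zero]
          rw [ih2]
          simp [hg2, hm]
        | succ k =>
          simp only [aRight, hm, if_true, List.getD_cons_succ]
          rw [ih1 k (by simpa using hk), show j + (k + 1) = j + 1 + k by omega]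
    · have hbr : bR mark r colsN j = j := by
        rw [bR, dif_neg (by rintro ⟨-, hc2⟩; exact hm (hg ▸ hc2))]
      constructor
      · simp only [aRight, hm, if_false]
        rw [hbr]
      · intro k hk
        cases k with
        | zero =>
          simp only [aRight, hm, if_false, List.getD_cons_zero]
          simp [hg2, hm]
        | succ k =>
          simp only [aRight, hm, if_false, List.getD_cons_succ]
          rw [ih1 k (by simpa using hk), show j + (k + 1) = j + 1 + k by omega]

theorem bRowGo_fst_le (mark : Int) (matrix : List (List Int)) (cols i : Nat) (row : List Int) :
    ∀ (f j : Nat) (st : Int × Int × Int × Int × Int), st.1 ≤ (bRowGo mark matrix cols i row j f st).1 := by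
  intro f
  induction f with
  | zero => intro j st; simp [bRowGo]
  | succ f ih =>
    intro j st
    rw [bRowGo]
    refine le_trans ?_ (ih (j + 1) _)
    by_cases h1 : row.getD j 0 = mark
    · simp only [h1, if_true]
      split_ifs with h2
      · exact le_of_lt h2
      · exact le_rfl
    · rw [if_neg h1]

theorem area_row_eq (mark : Int) (matrix : List (List Int)) (colsN i : Nat) :
    ∀ (n j : Nat) (ls ts hs : List Int) (st : Int × Int × Int × Int × Int),
      ls.length = n → ts.length = n → hs.length = n →
      (∀ k, k < n → ls.getD k 0 = ((Lf mark matrix (j + k) (i + 1) : Nat) : Int)) →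
      (∀ k, k < n → ts.getD k 0 = ((Rf mark matrix colsN (j + k) (i + 1) : Nat) : Int)) →
      (∀ k, k < n → hs.getD k 0 = ((countUp mark matrix (j + k) (i + 1) : Nat) : Int)) →
      0 ≤ st.1 →
      aArea (i : Int) st ls ts hs = bRowGo mark matrix colsN i (matrix.getD i []) j n st := by
  intro n
  induction n with
  | zero =>
    intro j ls ts hs st h1 h2 h3 _ _ _ _
    rw [List.length_eq_zero_iff] at h1 h2 h3
    subst h1; subst h2; subst h3
    simp [aArea, bRowGo]
  | succ n ih =>
    intro j ls ts hs st h1 h2 h3 hL hT hH hst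
    cases ls with
    | nil => simp at h1
    | cons l ls =>
    cases ts with
    | nil => simp at h2
    | cons t ts =>
    cases hs with
    | nil => simp at h3
    | cons h hs =>
    have hl0 := hL 0 (by omega)
    have ht0 := hT 0 (by omega)
    have hh0 := hH 0 (by omega)
    simp only [List.getD_cons_zero, Nat.add_zero] at hl0 ht0 hh0
    rw [aArea, bRowGo]
    by_cases hm : cellAt matrix i j = mark
    · have hhh : bUpGo mark matrix j i 1 = countUp mark matrix j (i + 1) := by
        rw [bUpGo_spec mark matrix j i i 1 (by omega) (by omega)]
        simp [countUp, hm]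
        omega
      have hp := bLR_spec mark matrix colsN j i
      have hmrow : (matrix.getD i []).getD j 0 = mark := hm
      simp only [hmrow, if_true, hhh, hp]
      rw [hl0, ht0, hh0]
      refine ih (j + 1) ls ts hs _ (by simpa using h1) (by simpa using h2) (by simpa using h3)
        (fun k hk => by simpa [show j + 1 + k = j + (k + 1) by omega] using hL (k + 1) (by omega))
        (fun k hk => by simpa [show j + 1 + k = j + (k + 1) by omega] using hT (k + 1) (by omega))
        (fun k hk => by simpa [show j + 1 + k = j + (k + 1) by omega] using hH (k + 1) (by omega)) ?_
      split_ifs with h2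
      · exact le_of_lt (lt_of_le_of_lt hst h2)
      · exact hst
    · have hLf : Lf mark matrix j (i + 1) = 0 := by simp [Lf, hm]
      have hRf : Rf mark matrix colsN j (i + 1) = colsN := by simp [Rf, hm]
      have hCu : countUp mark matrix j (i + 1) = 0 := by simp [countUp, hm]
      have hmrow : ¬ (matrix.getD i []).getD j 0 = mark := hm
      simp only [hmrow, if_false]
      rw [hl0, ht0, hh0, hLf, hRf, hCu]
      have hnolt : ¬ ((colsN : Int) - (0 : Nat)) * ((0 : Nat) : Int) > st.1 := by
        push_cast
        omega
      rw [if_neg hnolt]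
      exact ih (j + 1) ls ts hs st (by simpa using h1) (by simpa using h2) (by simpa using h3)
        (fun k hk => by simpa [show j + 1 + k = j + (k + 1) by omega] using hL (k + 1) (by omega))
        (fun k hk => by simpa [show j + 1 + k = j + (k + 1) by omega] using hT (k + 1) (by omega))
        (fun k hk => by simpa [show j + 1 + k = j + (k + 1) by omega] using hH (k + 1) (by omega)) hst

theorem rows_eq (mark : Int) (matrix : List (List Int)) (colsN : Nat)
    (hall : ∀ row ∈ matrix, colsN ≤ row.length) :
    ∀ (rest : List (List Int)) (i : Nat) (hgt lft rgt : List Int) (st : Int × Int × Int × Int × Int),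
      rest = matrix.drop i →
      hgt.length = colsN → lft.length = colsN → rgt.length = colsN →
      (∀ k, k < colsN → hgt.getD k 0 = ((countUp mark matrix k i : Nat) : Int)) →
      (∀ k, k < colsN → lft.getD k 0 = ((Lf mark matrix k i : Nat) : Int)) →
      (∀ k, k < colsN → rgt.getD k 0 = ((Rf mark matrix colsN k i : Nat) : Int)) →
      0 ≤ st.1 →
      aRows mark (colsN : Int) (i : Int) hgt lft rgt st rest = bRows mark matrix colsN i st rest := by
  intro rest
  induction rest with
  | nil => intro i hgt lft rgt st hdrop h1 h2 h3 _ _ _ _; simp [aRows, bRows]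
  | cons row rest ih =>
    intro i hgt lft rgt st hdrop h1 h2 h3 hH hLl hRr hst
    have hi : i < matrix.length := by
      by_contra hh
      rw [List.drop_eq_nil_iff.mpr (by omega)] at hdrop
      exact List.cons_ne_nil _ _ hdrop
    rw [List.drop_eq_getElem_cons hi] at hdrop
    obtain ⟨hrow, hrest⟩ := List.cons.injEq .. ▸ hdrop
    have hgd : matrix.getD i [] = matrix[i] := List.getD_eq_getElem matrix [] hi
    have hrow' : row = matrix.getD i [] := by rw [hgd, hrow]
    have hrl : colsN ≤ row.length := hall row (by rw [hrow']; rw [hgd]; exact List.getElem_mem hi)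
    -- the three updated arrays, pointwise
    have hlen1' : (aHeight mark row hgt).length = colsN := by
      rw [aHeight_length, h1]; omega
    have hlen2' : (aLeft mark 0 0 row lft).length = colsN := by
      rw [aLeft_length, h2]; omega
    have hlen3' : ((aRight mark (colsN : Int) 0 row rgt).1).length = colsN := by
      rw [aRight_length, h3]; omega
    have hH' : ∀ k, k < colsN → (aHeight mark row hgt).getD k 0 = ((countUp mark matrix k (i + 1) : Nat) : Int) := by
      intro k hk
      rw [aHeight_getD mark row hgt k (by omega) (by omega), hH k hk]
      have hcell : row.getD k 0 = cellAt matrix i k := by rw [hrow']; rfl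
      rw [hcell]
      by_cases hm : cellAt matrix i k = mark <;> simp [countUp, hm]
    have hL' : ∀ k, k < colsN → (aLeft mark 0 0 row lft).getD k 0 = ((Lf mark matrix k (i + 1) : Nat) : Int) := by
      intro k hk
      have haux := aLeft_getD mark row lft 0 k (by omega) (by omega)
      rw [List.drop_zero] at haux
      rw [show ((bL mark row 0 : Nat) : Int) = 0 from by simp [bL]] at haux
      rw [haux, hLl k hk]
      have hcell : row.getD (0 + k) 0 = cellAt matrix i k := by rw [hrow']; simp [cellAt]
      rw [hcell]
      by_cases hm : cellAt matrix i k = mark <;> simp [Lf, hm, hrow', Nat.cast_max]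
    have hR' : ∀ k, k < colsN → ((aRight mark (colsN : Int) 0 row rgt).1).getD k 0 = ((Rf mark matrix colsN k (i + 1) : Nat) : Int) := by
      intro k hk
      obtain ⟨-, hpt⟩ := aRight_spec mark row colsN hrl rgt 0 (by omega) (by omega)
      have hdr : row = row.drop 0 := rfl
      conv_lhs => rw [hdr]
      rw [hpt k (by omega), hRr k hk]
      have hcell : row.getD (0 + k) 0 = cellAt matrix i k := by rw [hrow']; simp [cellAt]
      rw [hcell]
      by_cases hm : cellAt matrix i k = mark <;> simp [Rf, hm, hrow', Nat.cast_min]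
    -- the state after this row
    have hstep : aArea (i : Int) st (aLeft mark 0 0 row lft) ((aRight mark (colsN : Int) 0 row rgt).1) (aHeight mark row hgt) =
        bRowGo mark matrix colsN i (matrix.getD i []) 0 colsN st := by
      refine area_row_eq mark matrix colsN i colsN 0 _ _ _ st hlen2' hlen3' hlen1'
        (fun k hk => by simpa using hL' k hk)
        (fun k hk => by simpa using hR' k hk)
        (fun k hk => by simpa using hH' k hk) hst
    rw [aRows, bRows, hstep, hrow',
      show ((i : Int) + 1) = (((i + 1 : Nat) : Int)) by push_cast; ring]
    rw [hrow'] at hlen1' hlen2' hlen3' hH' hL' hR'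
    exact ih (i + 1) _ _ _ _ hrest hlen1' hlen2' hlen3' hH' hL' hR'
      (le_trans hst (bRowGo_fst_le mark matrix colsN i (matrix.getD i []) colsN 0 st))

-- ===== VERDICT (by name: the statement is the Claim_ definition above) =====
theorem find_max_rectangles_spec : Claim_equal_find_max_rectangles := by
  intro matrix mark min_area _ hpre
  unfold Spec_find_max_rectangles
  cases matrix with
  | nil => rfl
  | cons row0 rest =>
    have hall : ∀ row ∈ row0 :: rest, row0.length ≤ row.length := by
      intro row hr
      simpa using hpre row hr
    have hmain := rows_eq mark (row0 :: rest) row0.length hall (row0 :: rest) 0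
      (List.replicate row0.length 0) (List.replicate row0.length 0)
      (List.replicate row0.length ((row0.length : Nat) : Int)) (0, 0, 0, 0, 0)
      rfl (by simp) (by simp) (by simp)
      (fun k hk => by simp [countUp, List.getD, hk])
      (fun k hk => by simp [Lf, List.getD, hk])
      (fun k hk => by simp [Rf, List.getD, hk])
      le_rfl
    unfold find_max_rectangles find_max_rectangles_alt
    dsimp only
    simp only [Nat.cast_zero] at hmain
    rw [hmain]
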